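-- pv_equiv track=rewrite | github.com/mehrdad-zade/Algorithm-Data-Structure | shortestpath.py | minTravelCost
-- ===== SOURCE A (Python) =====
-- def minTravelCost(citiesCost):
--     n = len(citiesCost)
--     boardingStation = 0
--     cost = 0
--     for i in range(1,n):
--         if citiesCost[i] < citiesCost[boardingStation]:
--             cost += citiesCost[boardingStation] * (i-boardingStation)
--             boardingStation = i
--     cost += citiesCost[boardingStation] * (n - boardingStation)
--     return cost
-- ===== SOURCE B (Python) =====
-- def minTravelCost(citiesCost):
--     m = citiesCost[0]
--     total = citiesCost[0]
--     for c in citiesCost[1:]: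
--         m = min(m, c)
--         total += m
--     return total
-- ===== Notes on version B (the rewrite author's own statement) =====
-- stated objective: simpler
-- what changed: A batches charges by segment length at boarding-station switches (cost += price * segment width, tracking an index); B observes the result is the sum of the prefix minima and adds the running minimum once per city, with no index arithmetic.
import Mathlib
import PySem

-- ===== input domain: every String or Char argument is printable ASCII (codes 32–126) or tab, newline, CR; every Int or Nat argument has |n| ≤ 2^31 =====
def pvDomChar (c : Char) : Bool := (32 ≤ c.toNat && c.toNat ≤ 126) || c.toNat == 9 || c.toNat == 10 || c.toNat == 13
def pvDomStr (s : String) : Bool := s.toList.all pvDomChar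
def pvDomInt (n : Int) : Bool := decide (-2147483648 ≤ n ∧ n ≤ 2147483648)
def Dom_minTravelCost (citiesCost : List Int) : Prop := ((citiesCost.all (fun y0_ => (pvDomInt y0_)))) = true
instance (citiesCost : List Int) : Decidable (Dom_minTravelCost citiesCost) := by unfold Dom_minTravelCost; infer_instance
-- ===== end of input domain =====

-- B replaces A's segment-batched charging (price * segment width at each boarding-station
-- switch) by adding the running prefix minimum once per city: simpler, no index arithmetic.


-- ===== PORT A =====
-- loop body of 'for i in range(1, n)': state = (boardingStation, cost)
def pvAStep (l : List Int) (st : Int × Int) (i : Int) : Int × Int :=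
  if PySem.List.pyGetD l i 0 < PySem.List.pyGetD l st.1 0 then
    (i, st.2 + PySem.List.pyGetD l st.1 0 * (i - st.1))
  else st

def minTravelCost (citiesCost : List Int) : Int :=
  let n : Int := citiesCost.length
  let s := (PySem.List.pyRange 1 n 1).foldl (pvAStep citiesCost) (0, 0)
  s.2 + PySem.List.pyGetD citiesCost s.1 0 * (n - s.1)

-- ===== PORT B =====
-- loop body of 'for c in citiesCost[1:]': state = (m, total)
def pvBStep (st : Int × Int) (c : Int) : Int × Int :=
  (min st.1 c, st.2 + min st.1 c)

def minTravelCost_alt (citiesCost : List Int) : Int :=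
  match citiesCost with
  | [] => 0      -- unreachable: Pre_ requires a nonempty list (Python B raises IndexError here)
  | x :: xs => (xs.foldl pvBStep (x, x)).2

-- ===== PRECONDITION & SPEC =====
-- Pre_ excludes only the empty list, on which A (and B) raise IndexError reading the first element.
def Pre_minTravelCost (citiesCost : List Int) : Prop := citiesCost ≠ []
instance (citiesCost : List Int) : Decidable (Pre_minTravelCost citiesCost) := by
  unfold Pre_minTravelCost; infer_instance
def pvWitness_minTravelCost : List Int := [3, 1, 4]

def Spec_minTravelCost (citiesCost : List Int) (out : Int) : Prop := out = minTravelCost_alt citiesCost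
instance (citiesCost : List Int) (out : Int) : Decidable (Spec_minTravelCost citiesCost out) := by unfold Spec_minTravelCost; infer_instance

-- ===== CLAIM (what is proved, stated in full; the proofs are below) =====
def Claim_equal_minTravelCost : Prop := ∀ (citiesCost : List Int), Dom_minTravelCost citiesCost → Pre_minTravelCost citiesCost → Spec_minTravelCost citiesCost (minTravelCost citiesCost)

-- ===== LEMMAS AND PROOFS =====

-- running prefix-minimum sum: g m xs = Σ over prefixes p of xs of (min of m :: p), p nonempty
def pvG (m : Int) : List Int → Int
  | [] => 0
  | c :: cs => min m c + pvG (min m c) cs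

theorem pvBStep_foldl (xs : List Int) (m t : Int) :
    (xs.foldl pvBStep (m, t)) = (xs.foldl min m, t + pvG m xs) := by
  induction xs generalizing m t with
  | nil => simp [pvG]
  | cons c cs ih => simp [pvBStep, pvG, ih (min m c) (t + min m c), add_assoc]

theorem pvG_append (ys : List Int) (m a : Int) :
    pvG m (ys ++ [a]) = pvG m ys + min (ys.foldl min m) a := by
  induction ys generalizing m with
  | nil => simp [pvG]
  | cons c cs ih => simp [pvG, ih (min m c), add_assoc]

-- invariant of A's loop after processing indices 1..j-1 (x :: xs, 1 ≤ j ≤ length)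
theorem pvA_invariant (x : Int) (xs : List Int) (j : Nat)
    (hj : 1 ≤ j) (hjn : j ≤ xs.length + 1) :
    ∃ b : Nat, b < j ∧
      ((PySem.List.pyRange 1 (j : Int) 1).foldl (pvAStep (x :: xs)) (0, 0)).1 = (b : Int) ∧
      PySem.List.pyGetD (x :: xs) (b : Int) 0 = (xs.take (j - 1)).foldl min x ∧
      ((PySem.List.pyRange 1 (j : Int) 1).foldl (pvAStep (x :: xs)) (0, 0)).2
        + PySem.List.pyGetD (x :: xs) (b : Int) 0 * ((j : Int) - (b : Int))
        = x + pvG x (xs.take (j - 1)) := by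
  induction j with
  | zero => omega
  | succ k ih =>
    rcases Nat.lt_or_ge k 1 with hk | hk
    · -- k = 0 : base case j = 1
      interval_cases k
      refine ⟨0, by omega, ?_, ?_, ?_⟩ <;>
        simp [PySem.List.pyRange_one_eq_nil (by norm_num : (1:Int) ≤ 1), pvG]
    · -- step: j = k+1, k ≥ 1
      obtain ⟨b, hb, h1, h2, h3⟩ := ih hk (by omega)
      have hk' : k - 1 < xs.length := by omega
      have hsplit : PySem.List.pyRange 1 ((k+1 : Nat) : Int) 1
          = PySem.List.pyRange 1 (k : Int) 1 ++ [(k : Int)] := by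
        push_cast
        exact PySem.List.pyRange_one_succ_right (by exact_mod_cast hk)
      have htake : xs.take (k + 1 - 1) = xs.take (k - 1) ++ [xs[k-1]] := by
        have hkk : k + 1 - 1 = (k - 1) + 1 := by omega
        rw [hkk, List.take_add_one, List.getElem?_eq_getElem hk']
        simp
      have hgetk : PySem.List.pyGetD (x :: xs) ((k : Nat) : Int) 0 = xs[k-1] := by
        rw [PySem.List.pyGetD_natCast]
        have : (x :: xs).getD k 0 = xs.getD (k-1) 0 := by
          cases k with | zero => omega | succ k' => simp
        rw [this, List.getD_eq_getElem _ _ hk']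
      rw [hsplit, List.foldl_append]
      set s := (PySem.List.pyRange 1 (k : Int) 1).foldl (pvAStep (x :: xs)) (0, 0) with hs
      rw [List.foldl_cons, List.foldl_nil]
      unfold pvAStep
      rw [h1, hgetk, h2]
      rw [h2] at h3
      by_cases hlt : xs[k-1] < (xs.take (k - 1)).foldl min x
      · -- switch boarding station to k
        refine ⟨k, by omega, by simp [hlt], ?_, ?_⟩
        · rw [hgetk, htake, List.foldl_append]
          simp [min_eq_right (le_of_lt hlt)]
        · rw [hgetk, htake, pvG_append]
          simp only [hlt, if_pos]
          rw [min_eq_right (le_of_lt hlt)]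
          have hr : xs[k-1] * (((k:Nat)+1 : Int) - ((k:Nat) : Int)) = xs[k-1] := by ring
          push_cast at hr h3 ⊢
          linarith [hr, h3]
      · -- keep boarding station
        refine ⟨b, by omega, by simp [hlt, h1], ?_, ?_⟩
        · rw [h2, htake, List.foldl_append]
          simp [min_eq_left (le_of_not_gt hlt)]
        · rw [htake, pvG_append]
          simp only [hlt, if_neg, not_false_iff]
          rw [h2, min_eq_left (le_of_not_gt hlt)]
          have hr : ((xs.take (k-1)).foldl min x) * (((k:Nat)+1 : Int) - (b : Int))
              = ((xs.take (k-1)).foldl min x) * (((k:Nat) : Int) - (b : Int))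
                + (xs.take (k-1)).foldl min x := by ring
          push_cast at hr h3 ⊢
          linarith [hr, h3]

-- ===== VERDICT (by name: the statement is the Claim_ definition above) =====
theorem minTravelCost_spec : Claim_equal_minTravelCost := by
  intro l _ hpre
  unfold Spec_minTravelCost
  match l with
  | [] => exact absurd rfl hpre
  | x :: xs =>
    obtain ⟨b, hb, h1, h2, h3⟩ :=
      pvA_invariant x xs (xs.length + 1) (by omega) (by omega)
    simp only [minTravelCost, minTravelCost_alt]
    rw [pvBStep_foldl]
    simp only [Nat.add_sub_cancel, List.take_length] at h1 h2 h3
    rw [h2] at h3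
    have hn : (((x :: xs).length : Nat) : Int) = ((xs.length + 1 : Nat) : Int) := by simp
    rw [hn, h1, h2]
    push_cast at h3 ⊢
    linarith [h3]
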